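-- pv_equiv track=rewrite | github.com/oranguthang/pacman_src | scripts/generate_repro_disasm.py | split_csv_keeping_quotes
-- ===== SOURCE A (Python) =====
-- def split_csv_keeping_quotes(s: str) -> list[str]:
--     out: list[str] = []
--     buf: list[str] = []
--     in_quote = False
--     for ch in s:
--         if ch == '"':
--             in_quote = not in_quote
--             buf.append(ch)
--         elif ch == "," and not in_quote:
--             tok = "".join(buf).strip()
--             if tok:
--                 out.append(tok)
--             buf = []
--         else:
--             buf.append(ch)
--     tok = "".join(buf).strip()
--     if tok:
--         out.append(tok)
--     return out
-- ===== SOURCE B (Python) =====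
-- def split_csv_keeping_quotes(s: str) -> list[str]:
--     out: list[str] = []
--     cur = ""
--     q = 0
--     for part in s.split(','):
--         if q % 2 == 1:
--             cur += ',' + part
--         else:
--             cur = part
--         q += part.count('"')
--         if q % 2 == 0:
--             tok = cur.strip()
--             if tok:
--                 out.append(tok)
--             cur = ""
--             q = 0
--     if q % 2 == 1:
--         tok = cur.strip()
--         if tok:
--             out.append(tok)
--     return out
-- ===== Notes on version B (the rewrite author's own statement) =====
-- stated objective: faster
-- what changed: B replaces A's character-by-character scan with an in_quote flag by splitting the string on every comma once and re-joining consecutive pieces while the running count of double-quote characters is odd, flushing a stripped field whenever the count turns even.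
import Mathlib
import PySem

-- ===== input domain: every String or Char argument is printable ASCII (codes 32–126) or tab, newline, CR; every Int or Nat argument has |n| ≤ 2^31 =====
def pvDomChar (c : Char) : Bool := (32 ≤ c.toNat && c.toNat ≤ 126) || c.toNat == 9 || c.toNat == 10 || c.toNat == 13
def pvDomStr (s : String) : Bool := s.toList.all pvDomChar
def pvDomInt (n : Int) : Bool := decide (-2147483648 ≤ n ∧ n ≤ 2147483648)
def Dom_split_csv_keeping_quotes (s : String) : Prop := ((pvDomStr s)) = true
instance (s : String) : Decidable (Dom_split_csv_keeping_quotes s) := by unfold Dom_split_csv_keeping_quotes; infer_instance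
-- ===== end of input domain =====

-- B replaces A's character-by-character quote-tracking scan by splitting on every comma
-- once and re-joining the pieces by running quote parity (objective: faster by a constant
-- factor, measured; same O(n) asymptotics).

-- shared helper: tok = "".join(buf).strip(); if tok: out.append(tok)  (identical line in both Pythons)
def pvFlush (out : List (List Char)) (buf : List Char) : List (List Char) :=
  let tok := PySem.Chars.strip buf
  if tok.isEmpty then out else out ++ [tok]

-- ===== PORT A =====
-- loop body of A: state (out, buf, in_quote), one character at a time
def pvStepA (st : List (List Char) × List Char × Bool) (ch : Char) :
    List (List Char) × List Char × Bool :=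
  if ch == '"' then (st.1, st.2.1 ++ [ch], !st.2.2)
  else if ch == ',' && !st.2.2 then (pvFlush st.1 st.2.1, [], st.2.2)
  else (st.1, st.2.1 ++ [ch], st.2.2)

def split_csv_keeping_quotes (s : String) : List String :=
  let st := s.toList.foldl pvStepA ([], [], false)
  (pvFlush st.1 st.2.1).map String.ofList

-- ===== PORT B =====
-- loop body of B: state (out, cur, q); q is the running count of '"' in the open field
def pvStepB (st : List (List Char) × List Char × Nat) (part : List Char) :
    List (List Char) × List Char × Nat :=
  let cur := if st.2.2 % 2 = 1 then st.2.1 ++ ',' :: part else part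
  let q := st.2.2 + PySem.Chars.count part ['"']
  if q % 2 = 0 then (pvFlush st.1 cur, ([] : List Char), 0)
  else (st.1, cur, q)

def split_csv_keeping_quotes_alt (s : String) : List String :=
  let parts := PySem.Chars.splitOn s.toList [',']   -- s.split(',')
  let st := parts.foldl pvStepB ([], [], 0)
  (if st.2.2 % 2 = 1 then pvFlush st.1 st.2.1 else st.1).map String.ofList

-- ===== PRECONDITION & SPEC =====
def Spec_split_csv_keeping_quotes (s : String) (out : List String) : Prop := out = split_csv_keeping_quotes_alt s
instance (s : String) (out : List String) : Decidable (Spec_split_csv_keeping_quotes s out) := by unfold Spec_split_csv_keeping_quotes; infer_instance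

-- ===== CLAIM (what is proved, stated in full; the proofs are below) =====
def Claim_equal_split_csv_keeping_quotes : Prop := ∀ (s : String), Dom_split_csv_keeping_quotes s → Spec_split_csv_keeping_quotes s (split_csv_keeping_quotes s)

-- ===== LEMMAS AND PROOFS =====

-- structural single-character splitter used only in the proofs: head field and remaining fields
def pvSplit1 (c : Char) : List Char → List Char × List (List Char)
  | [] => ([], [])
  | a :: rest =>
    if a = c then ([], (pvSplit1 c rest).1 :: (pvSplit1 c rest).2)
    else (a :: (pvSplit1 c rest).1, (pvSplit1 c rest).2)

-- B's final flush, as a function of the loop state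
def pvFinB (st : List (List Char) × List Char × Nat) : List (List Char) :=
  if st.2.2 % 2 = 1 then pvFlush st.1 st.2.1 else st.1

lemma pvGo_spec (c : Char) : ∀ (l : List Char) (fuel : Nat) (cur : List Char)
    (acc : List (List Char)), l.length < fuel →
    PySem.Chars.splitOn.go [c] fuel l cur acc
      = acc.reverse ++ (cur.reverse ++ (pvSplit1 c l).1) :: (pvSplit1 c l).2 := by
  intro l
  induction l with
  | nil =>
    intro fuel cur acc h
    match fuel, h with
    | fuel + 1, _ => simp [PySem.Chars.splitOn.go, pvSplit1]
  | cons a rest ih =>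
    intro fuel cur acc h
    match fuel, h with
    | fuel + 1, h =>
      have hr : rest.length < fuel := by simpa using h
      by_cases hac : a = c
      · subst hac
        simp [PySem.Chars.splitOn.go, List.isPrefixOf, pvSplit1, ih rest.length.succ, ih _ _ _ hr]
      · simp [PySem.Chars.splitOn.go, List.isPrefixOf, hac, Ne.symm hac, pvSplit1,
          ih _ _ _ hr]
      
lemma pvSplitOn_single (c : Char) (l : List Char) :
    PySem.Chars.splitOn l [c] = (pvSplit1 c l).1 :: (pvSplit1 c l).2 := by
  have := pvGo_spec c l (l.length + 1) [] [] (by omega)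
  simpa [PySem.Chars.splitOn] using this

lemma pvSplit1_recomb (c : Char) : ∀ l : List Char,
    (pvSplit1 c l).1 ++ ((pvSplit1 c l).2).flatMap (fun p => c :: p) = l := by
  intro l
  induction l with
  | nil => simp [pvSplit1]
  | cons a rest ih =>
    by_cases hac : a = c
    · subst hac; simp [pvSplit1, ih]
    · simp [pvSplit1, hac, ih]

lemma pvSplit1_no_sep (c : Char) : ∀ l : List Char,
    c ∉ (pvSplit1 c l).1 ∧ ∀ p ∈ (pvSplit1 c l).2, c ∉ p := by
  intro l
  induction l with
  | nil => simp [pvSplit1]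
  | cons a rest ih =>
    by_cases hac : a = c
    · subst hac
      simp only [pvSplit1, if_pos rfl]
      refine ⟨by simp, ?_⟩
      intro p hp
      rcases List.mem_cons.mp hp with hp | hp
      · subst hp; exact ih.1
      · exact ih.2 p hp
    · simp only [pvSplit1, if_neg hac]
      refine ⟨?_, ih.2⟩
      simpa [Ne.symm hac] using ih.1

lemma pvCount_go_spec (c : Char) : ∀ (l : List Char) (fuel : Nat) (acc : Nat),
    l.length ≤ fuel →
    PySem.Chars.count.go [c] fuel l acc = acc + l.count c := by
  intro l
  induction l with
  | nil =>
    intro fuel acc h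
    match fuel with
    | 0 => simp [PySem.Chars.count.go]
    | fuel + 1 => simp [PySem.Chars.count.go]
  | cons a rest ih =>
    intro fuel acc h
    match fuel, h with
    | fuel + 1, h =>
      have hr : rest.length ≤ fuel := by simpa using h
      by_cases hac : a = c
      · subst hac
        simp [PySem.Chars.count.go, List.isPrefixOf, ih _ _ hr, List.count_cons]
        omega
      · simp [PySem.Chars.count.go, List.isPrefixOf, hac, Ne.symm hac, ih _ _ hr,
          List.count_cons]

lemma pvCount_single (c : Char) (l : List Char) :
    PySem.Chars.count l [c] = l.count c := by
  simpa [PySem.Chars.count] using pvCount_go_spec c l l.length 0 le_rfl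

-- running A's loop through a comma-free block: everything goes into buf, quotes toggle
lemma pvStepA_part : ∀ (p : List Char) (out : List (List Char)) (buf : List Char)
    (inq : Bool), ',' ∉ p →
    List.foldl pvStepA (out, buf, inq) p
      = (out, buf ++ p, inq ^^ decide (p.count '"' % 2 = 1)) := by
  intro p
  induction p with
  | nil => intro out buf inq _; simp
  | cons a rest ih =>
    intro out buf inq hp
    have ha : a ≠ ',' := by intro h; exact hp (by simp [h])
    have hrest : ',' ∉ rest := by intro h; exact hp (by simp [h])
    by_cases haq : a = '"'
    · subst haq
      have hstep : pvStepA (out, buf, inq) '"' = (out, buf ++ ['"'], !inq) := by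
        simp [pvStepA]
      rw [List.foldl_cons, hstep, ih out (buf ++ ['"']) (!inq) hrest]
      refine congrArg _ ?_
      refine Prod.ext (by simp) ?_
      have hcnt : List.count '"' ('"' :: rest) = List.count '"' rest + 1 := by
        simp [List.count_cons]
      rw [hcnt]
      by_cases hr2 : List.count '"' rest % 2 = 1
      · have h0 : (List.count '"' rest + 1) % 2 = 0 := by omega
        simp [hr2, h0]
      · have h1 : (List.count '"' rest + 1) % 2 = 1 := by omega
        simp [hr2, h1]
    · have hstep : pvStepA (out, buf, inq) a = (out, buf ++ [a], inq) := by
        simp [pvStepA, haq, ha]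
      rw [List.foldl_cons, hstep, ih out (buf ++ [a]) inq hrest]
      simp [List.count_cons, haq]

-- the loop correspondence: A over the flattened ","-prefixed parts vs B over the parts
lemma pvMain : ∀ (ps : List (List Char)) (out : List (List Char)) (buf : List Char)
    (q : Nat), (∀ p ∈ ps, ',' ∉ p) → q = buf.count '"' →
    pvFinB (List.foldl pvStepB (if q % 2 = 1 then (out, buf, q) else (pvFlush out buf, [], 0)) ps)
      = pvFlush (List.foldl pvStepA (out, buf, decide (q % 2 = 1)) (ps.flatMap (fun p => ',' :: p))).1
                (List.foldl pvStepA (out, buf, decide (q % 2 = 1)) (ps.flatMap (fun p => ',' :: p))).2.1 := by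
  intro ps
  induction ps with
  | nil =>
    intro out buf q _ hq
    by_cases h : q % 2 = 1 <;> simp [h, pvFinB]
  | cons p rest ih =>
    intro out buf q hp hq
    have hpc : ',' ∉ p := hp p (by simp)
    have hrest : ∀ r ∈ rest, ',' ∉ r := fun r hr => hp r (List.mem_cons_of_mem p hr)
    have flip : ∀ (o : List (List Char)) (b : List Char) (n : Nat),
        (if n % 2 = 0 then (pvFlush o b, ([] : List Char), (0 : Nat)) else (o, b, n))
          = if n % 2 = 1 then (o, b, n) else (pvFlush o b, [], 0) := by
      intro o b n
      rcases Nat.mod_two_eq_zero_or_one n with h | h <;> simp [h]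
    by_cases hodd : q % 2 = 1
    · -- A appends the comma to buf, B re-joins with ','
      have hA1 : pvStepA (out, buf, decide (q % 2 = 1)) ','
          = (out, buf ++ [','], decide (q % 2 = 1)) := by
        simp [pvStepA, hodd]
      have hxor : (decide (q % 2 = 1) ^^ decide (p.count '"' % 2 = 1))
          = decide ((q + p.count '"') % 2 = 1) := by
        by_cases hc : p.count '"' % 2 = 1
        · have h0 : (q + p.count '"') % 2 = 0 := by omega
          simp [hc, hodd, h0]
        · have h1 : (q + p.count '"') % 2 = 1 := by omega
          simp [hc, hodd, h1]
      have hA : List.foldl pvStepA (out, buf, decide (q % 2 = 1))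
            ((p :: rest).flatMap (fun p => ',' :: p))
          = List.foldl pvStepA (out, buf ++ ',' :: p, decide ((q + p.count '"') % 2 = 1))
            (rest.flatMap (fun p => ',' :: p)) := by
        rw [List.flatMap_cons, List.foldl_append, List.foldl_cons, hA1,
          pvStepA_part p out (buf ++ [',']) (decide (q % 2 = 1)) hpc, hxor]
        simp
      have hB : pvStepB (out, buf, q) p
          = if (q + p.count '"') % 2 = 1 then (out, buf ++ ',' :: p, q + p.count '"')
            else (pvFlush out (buf ++ ',' :: p), [], 0) := by
        rw [← flip]
        simp [pvStepB, hodd, pvCount_single]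
      have hq' : q + p.count '"' = (buf ++ ',' :: p).count '"' := by
        simp [List.count_append, List.count_cons, hq]
      rw [if_pos hodd, List.foldl_cons, hB, hA]
      exact ih out (buf ++ ',' :: p) (q + p.count '"') hrest hq'
    · -- A flushes at the unquoted comma, B starts a fresh field
      have hA1 : pvStepA (out, buf, decide (q % 2 = 1)) ','
          = (pvFlush out buf, [], decide (q % 2 = 1)) := by
        simp [pvStepA, hodd]
      have hA : List.foldl pvStepA (out, buf, decide (q % 2 = 1))
            ((p :: rest).flatMap (fun p => ',' :: p))
          = List.foldl pvStepA (pvFlush out buf, p, decide (p.count '"' % 2 = 1))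
            (rest.flatMap (fun p => ',' :: p)) := by
        rw [List.flatMap_cons, List.foldl_append, List.foldl_cons, hA1,
          pvStepA_part p (pvFlush out buf) [] (decide (q % 2 = 1)) hpc]
        simp [hodd]
      have hB : pvStepB (pvFlush out buf, [], 0) p
          = if p.count '"' % 2 = 1 then (pvFlush out buf, p, p.count '"')
            else (pvFlush (pvFlush out buf) p, [], 0) := by
        rw [← flip]
        simp [pvStepB, pvCount_single]
      rw [if_neg hodd, List.foldl_cons, hB, hA]
      exact ih (pvFlush out buf) p (p.count '"') hrest rfl

-- ===== VERDICT (by name: the statement is the Claim_ definition above) =====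
theorem split_csv_keeping_quotes_spec : Claim_equal_split_csv_keeping_quotes := by
  intro s _
  unfold Spec_split_csv_keeping_quotes split_csv_keeping_quotes split_csv_keeping_quotes_alt
  dsimp only
  rw [pvSplitOn_single]
  obtain ⟨h1, h2⟩ := pvSplit1_no_sep ',' s.toList
  have hrec := pvSplit1_recomb ',' s.toList
  have flip : ∀ (o : List (List Char)) (b : List Char) (n : Nat),
      (if n % 2 = 0 then (pvFlush o b, ([] : List Char), (0 : Nat)) else (o, b, n))
        = if n % 2 = 1 then (o, b, n) else (pvFlush o b, [], 0) := by
    intro o b n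
    rcases Nat.mod_two_eq_zero_or_one n with h | h <;> simp [h]
  have hA : List.foldl pvStepA ([], [], false) s.toList
      = List.foldl pvStepA ([], (pvSplit1 ',' s.toList).1,
          decide ((pvSplit1 ',' s.toList).1.count '"' % 2 = 1))
        (((pvSplit1 ',' s.toList).2).flatMap (fun p => ',' :: p)) := by
    conv_lhs => rw [← hrec]
    rw [List.foldl_append, pvStepA_part (pvSplit1 ',' s.toList).1 [] [] false h1]
    simp
  have hB : pvStepB ([], [], 0) (pvSplit1 ',' s.toList).1
      = if (pvSplit1 ',' s.toList).1.count '"' % 2 = 1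
        then ([], (pvSplit1 ',' s.toList).1, (pvSplit1 ',' s.toList).1.count '"')
        else (pvFlush [] (pvSplit1 ',' s.toList).1, [], 0) := by
    rw [← flip]
    simp [pvStepB, pvCount_single]
  have hmain := pvMain (pvSplit1 ',' s.toList).2 [] (pvSplit1 ',' s.toList).1
    ((pvSplit1 ',' s.toList).1.count '"') h2 rfl
  rw [List.foldl_cons, hB]
  rw [hA]
  exact congrArg (List.map String.ofList) (by rw [← hmain]; rfl)
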